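-- pv_equiv track=rewrite | github.com/yyuan29/project001 | markdown_compiler/util/line_functions.py | compile_strikethrough
-- ===== SOURCE A (Python) =====
-- def compile_strikethrough(line):
--     '''
--     Convert "~~strikethrough~~" to "<ins>strikethrough</ins>".
--
--     HINT:
--     The strikethrough annotations are very similar to implement
--     as the italic function.
--     The difference is that there are two delimiting characters instead of one.
--     This will require carefully thinking about the range
--     of your for loop and all of your list indexing.
--
--     >>> compile_strikethrough('~~This is strikethrough!~~
--     This is not strikethrough.')
--     '<ins>This is strikethrough!</ins> This is not strikethrough.'
--     >>> compile_strikethrough('~~This is strikethrough!~~')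
--     '<ins>This is strikethrough!</ins>'
--     >>> compile_strikethrough('This is ~~strikethrough~~!')
--     'This is <ins>strikethrough</ins>!'
--     >>> compile_strikethrough('This is not ~~strikethrough!')
--     'This is not ~~strikethrough!'
--     >>> compile_strikethrough('~~')
--     '~~'
--     '''
--     result = ""
--     i = 0
--     while i < len(line):
--         if line[i:i + 2] == "~~" and line.find("~~", i + 2) != -1:
--             end = line.find("~~", i + 2)
--             if end != -1:
--                 result += "<ins>" + line[i + 2: end] + "</ins>"
--                 i = end + 2
--             else:
--                 result += line[i]
--                 i += 1
--         else:
--             result += line[i]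
--             i += 1
--
--     return result
-- ===== SOURCE B (Python) =====
-- def compile_strikethrough(line):
--     chunks = []
--     rest = line
--     while True:
--         a = rest.find("~~")
--         if a == -1:
--             chunks.append(rest)
--             break
--         b = rest.find("~~", a + 2)
--         if b == -1:
--             chunks.append(rest)
--             break
--         chunks.append(rest[:a] + "<ins>" + rest[a + 2:b] + "</ins>")
--         rest = rest[b + 2:]
--     return "".join(chunks)
-- ===== Notes on version B (the rewrite author's own statement) =====
-- stated objective: faster
-- what changed: A scans the string character by character, appending one character at a time and re-running a substring search at every opener it stands on; B never walks single characters: it repeatedly locates the next matched delimiter pair with two substring searches, emits one rebuilt chunk per pair, and joins the chunks at the end.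
import Mathlib
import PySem

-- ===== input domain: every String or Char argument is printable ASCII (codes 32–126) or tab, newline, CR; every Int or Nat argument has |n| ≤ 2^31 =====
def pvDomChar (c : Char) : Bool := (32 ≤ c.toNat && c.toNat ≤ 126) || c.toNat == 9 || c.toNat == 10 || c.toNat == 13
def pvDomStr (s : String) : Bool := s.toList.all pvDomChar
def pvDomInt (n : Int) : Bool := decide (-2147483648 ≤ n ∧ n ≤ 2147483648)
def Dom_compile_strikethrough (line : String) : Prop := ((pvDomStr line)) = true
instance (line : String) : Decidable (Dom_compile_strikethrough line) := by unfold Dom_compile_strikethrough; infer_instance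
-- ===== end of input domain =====

-- B replaces A's character-by-character scan (with its per-character appends) by a find-driven
-- chunk loop that joins one rebuilt chunk per delimiter pair; measured faster at large sizes.

-- ===== PORT A =====
-- A's while loop over the index i with the running `result` string; the fuel argument only
-- makes the recursion structural (it never runs out: i grows by at least 1 per iteration).
def pvGoA (l : List Char) : Nat → Nat → List Char → List Char
  | 0, _, result => result
  | fuel+1, i, result =>
    if i < l.length then
      if PySem.List.slice l (some (i : Int)) (some ((i : Int) + 2)) = ['~', '~'] ∧
          PySem.Chars.findFrom l ['~', '~'] ((i : Int) + 2) ≠ -1 then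
        let e := PySem.Chars.findFrom l ['~', '~'] ((i : Int) + 2)
        if e ≠ -1 then
          pvGoA l fuel (e.toNat + 2)
            (result ++ "<ins>".toList ++ PySem.List.slice l (some ((i : Int) + 2)) (some e) ++ "</ins>".toList)
        else
          match PySem.List.pyGet? l (i : Int) with
          | some c => pvGoA l fuel (i + 1) (result ++ [c])
          | none => result
      else
        match PySem.List.pyGet? l (i : Int) with
        | some c => pvGoA l fuel (i + 1) (result ++ [c])
        | none => result
    else result

def compile_strikethrough (line : String) : String :=
  String.mk (pvGoA line.toList (line.toList.length + 1) 0 [])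

-- ===== PORT B =====
-- B's `while True` chunk loop: find an opener and its closer, emit one rebuilt chunk,
-- continue on the remainder; fuel only makes the recursion structural (it never runs out).
def pvGoB : Nat → List Char → List (List Char) → List (List Char)
  | 0, _, chunks => chunks
  | fuel+1, rest, chunks =>
    let a := PySem.Chars.find rest ['~', '~']
    if a = -1 then chunks ++ [rest]
    else
      let b := PySem.Chars.findFrom rest ['~', '~'] (a + 2)
      if b = -1 then chunks ++ [rest]
      else
        pvGoB fuel (PySem.List.slice rest (some (b + 2)) none)
          (chunks ++ [PySem.List.slice rest none (some a) ++ "<ins>".toList ++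
                      PySem.List.slice rest (some (a + 2)) (some b) ++ "</ins>".toList])

def compile_strikethrough_alt (line : String) : String :=
  String.mk (PySem.Chars.join [] (pvGoB (line.toList.length + 1) line.toList []))

-- ===== PRECONDITION & SPEC =====
def Spec_compile_strikethrough (line : String) (out : String) : Prop := out = compile_strikethrough_alt line
instance (line : String) (out : String) : Decidable (Spec_compile_strikethrough line out) := by unfold Spec_compile_strikethrough; infer_instance

-- ===== CLAIM (what is proved, stated in full; the proofs are below) =====
def Claim_equal_compile_strikethrough : Prop := ∀ (line : String), Dom_compile_strikethrough line → Spec_compile_strikethrough line (compile_strikethrough line)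

-- ===== LEMMAS AND PROOFS =====

-- pvSplitTT s = some (m, r) iff the first occurrence of "~~" in s splits it as m ++ "~~" ++ r.
def pvSplitTT : List Char → Option (List Char × List Char)
  | [] => none
  | [_] => none
  | a :: b :: t =>
    if a = '~' ∧ b = '~' then some ([], t)
    else (pvSplitTT (b :: t)).map (fun p => (a :: p.1, p.2))

lemma splitTT_cons2 (a b : Char) (t : List Char) :
    pvSplitTT (a :: b :: t) = if a = '~' ∧ b = '~' then some ([], t)
      else (pvSplitTT (b :: t)).map (fun p => (a :: p.1, p.2)) := rfl

lemma splitTT_shape : ∀ (s m r : List Char), pvSplitTT s = some (m, r) → s = m ++ '~' :: '~' :: r := by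
  intro s
  induction s with
  | nil => intro m r h; simp [pvSplitTT] at h
  | cons a t ih =>
    intro m r h
    cases t with
    | nil => simp [pvSplitTT] at h
    | cons b t' =>
      rw [splitTT_cons2] at h
      by_cases hab : a = '~' ∧ b = '~'
      · rw [if_pos hab] at h
        simp only [Option.some.injEq, Prod.mk.injEq] at h
        rw [← h.1, ← h.2, hab.1, hab.2]
        rfl
      · rw [if_neg hab] at h
        cases hbt : pvSplitTT (b :: t') with
        | none => rw [hbt] at h; simp at h
        | some p =>
          obtain ⟨m', r'⟩ := p
          rw [hbt] at h
          simp only [Option.map_some, Option.some.injEq, Prod.mk.injEq] at h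
          obtain ⟨h1, h2⟩ := h
          subst h1; subst h2
          have := ih m' r' hbt
          simp [this]

lemma not_TT_infix_short (a : Char) : ¬ (['~', '~'] <:+: [a]) := by
  intro h
  have := h.length_le
  simp at this

lemma splitTT_none_iff : ∀ (s : List Char), pvSplitTT s = none ↔ ¬ (['~', '~'] <:+: s) := by
  intro s
  induction s with
  | nil =>
    simp only [pvSplitTT, true_iff]
    intro h
    have := h.length_le
    simp at this
  | cons a t ih =>
    cases t with
    | nil =>
      simp only [pvSplitTT, true_iff]
      exact not_TT_infix_short a
    | cons b t' =>
      rw [splitTT_cons2]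
      by_cases hab : a = '~' ∧ b = '~'
      · rw [if_pos hab]
        constructor
        · intro h; simp at h
        · intro h
          exact absurd ⟨[], t', by simp [hab.1, hab.2]⟩ h
      · rw [if_neg hab]
        constructor
        · intro h hin
          rcases List.infix_cons_iff.mp hin with hpre | hinf
          · rw [List.cons_prefix_cons] at hpre
            obtain ⟨h1, hpre2⟩ := hpre
            rw [List.cons_prefix_cons] at hpre2
            exact hab ⟨h1.symm, hpre2.1.symm⟩
          · rw [Option.map_eq_none_iff] at h
            exact (ih.mp h) hinf
        · intro h
          rw [Option.map_eq_none_iff, ih]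
          intro hin
          exact h (List.infix_cons hin)

lemma splitTT_min : ∀ (s m r : List Char), pvSplitTT s = some (m, r) →
    ∀ j < m.length, ¬ (['~', '~'] <+: s.drop j) := by
  intro s
  induction s with
  | nil => intro m r h; simp [pvSplitTT] at h
  | cons a t ih =>
    intro m r h
    cases t with
    | nil => simp [pvSplitTT] at h
    | cons b t' =>
      rw [splitTT_cons2] at h
      by_cases hab : a = '~' ∧ b = '~'
      · rw [if_pos hab] at h
        simp only [Option.some.injEq, Prod.mk.injEq] at h
        intro j hj
        rw [← h.1] at hj
        simp at hj
      · rw [if_neg hab] at h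
        cases hbt : pvSplitTT (b :: t') with
        | none => rw [hbt] at h; simp at h
        | some p =>
          obtain ⟨m', r'⟩ := p
          rw [hbt] at h
          simp only [Option.map_some, Option.some.injEq, Prod.mk.injEq] at h
          obtain ⟨h1, h2⟩ := h
          subst h1; subst h2
          intro j hj
          cases j with
          | zero =>
            intro hpre
            simp only [List.drop_zero] at hpre
            rw [List.cons_prefix_cons] at hpre
            obtain ⟨h1, hpre2⟩ := hpre
            rw [List.cons_prefix_cons] at hpre2
            exact hab ⟨h1.symm, hpre2.1.symm⟩
          | succ j' =>
            simp only [List.drop_succ_cons]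
            apply ih m' r' hbt j'
            simp at hj
            omega

lemma find_TT_none (s : List Char) (h : pvSplitTT s = none) :
    PySem.Chars.find s ['~', '~'] = -1 := by
  rw [PySem.Chars.find_eq_neg_one_iff]
  exact (splitTT_none_iff s).mp h

lemma find_TT_some (s m r : List Char) (h : pvSplitTT s = some (m, r)) :
    PySem.Chars.find s ['~', '~'] = (m.length : Int) := by
  have hshape := splitTT_shape s m r h
  have hinf : ['~', '~'] <:+: s := ⟨m, r, by simp [hshape]⟩
  have hnn : 0 ≤ PySem.Chars.find s ['~', '~'] := (PySem.Chars.find_nonneg_iff s _).mpr hinf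
  obtain ⟨hpre, hmin⟩ := PySem.Chars.find_spec hnn
  have hpre' : ['~', '~'] <+: s.drop m.length := by
    rw [hshape, List.drop_left]
    exact ⟨r, rfl⟩
  have h1 : ¬ ((PySem.Chars.find s ['~', '~']).toNat < m.length) := by
    intro hlt
    exact splitTT_min s m r h _ hlt hpre
  have h2 : ¬ (m.length < (PySem.Chars.find s ['~', '~']).toNat) := by
    intro hlt
    exact hmin m.length hlt hpre'
  omega

lemma TT_take (m r : List Char) : (m ++ '~' :: '~' :: r).take m.length = m :=
  List.take_left

lemma TT_drop (m r : List Char) : (m ++ '~' :: '~' :: r).drop (m.length + 2) = r := by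
  have h : m ++ '~' :: '~' :: r = (m ++ ['~', '~']) ++ r := by simp
  rw [h]
  have hl : (m ++ ['~', '~']).length = m.length + 2 := by simp
  rw [← hl, List.drop_left]

lemma splitTT_len (s m r : List Char) (h : pvSplitTT s = some (m, r)) :
    s.length = m.length + 2 + r.length := by
  rw [splitTT_shape s m r h]; simp; omega

-- the common meaning of both programs: cut at the first "~~" pair, rebuild, recurse
def specTop (l : List Char) : List Char :=
  match h : pvSplitTT l with
  | none => l
  | some (p0, r) =>
    match h2 : pvSplitTT r with
    | none => l
    | some (m, r') => p0 ++ "<ins>".toList ++ m ++ "</ins>".toList ++ specTop r'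
termination_by l.length
decreasing_by
  have e1 := splitTT_len l p0 r h
  have e2 := splitTT_len r m r' h2
  omega

lemma specTop_of_none (l : List Char) (h : pvSplitTT l = none) : specTop l = l := by
  rw [specTop.eq_def]
  split
  · rfl
  · rename_i p0 r hsome
    rw [h] at hsome; exact absurd hsome (by simp)

lemma specTop_of_some_none (l p0 r : List Char) (h : pvSplitTT l = some (p0, r))
    (h2 : pvSplitTT r = none) : specTop l = l := by
  rw [specTop.eq_def]
  split
  · rfl
  · rename_i p0' r' hsome
    rw [h] at hsome
    simp only [Option.some.injEq, Prod.mk.injEq] at hsome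
    obtain ⟨h1', h2'⟩ := hsome
    subst h1'; subst h2'
    split
    · rfl
    · rename_i m r2 hsome2
      rw [h2] at hsome2; exact absurd hsome2 (by simp)

lemma specTop_eq (l p0 r m r' : List Char) (h : pvSplitTT l = some (p0, r))
    (h2 : pvSplitTT r = some (m, r')) :
    specTop l = p0 ++ "<ins>".toList ++ m ++ "</ins>".toList ++ specTop r' := by
  rw [specTop.eq_def]
  split
  · rename_i hnone; rw [h] at hnone; exact absurd hnone (by simp)
  · rename_i p0' r2 hsome
    rw [h] at hsome
    simp only [Option.some.injEq, Prod.mk.injEq] at hsome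
    obtain ⟨h1', h2'⟩ := hsome
    subst h1'; subst h2'
    split
    · rename_i hnone2; rw [h2] at hnone2; exact absurd hnone2 (by simp)
    · rename_i m2 r3 hsome2
      rw [h2] at hsome2
      simp only [Option.some.injEq, Prod.mk.injEq] at hsome2
      obtain ⟨h1', h2'⟩ := hsome2
      subst h1'; subst h2'
      rfl

lemma specTop_nil : specTop [] = [] :=
  specTop_of_none [] (by simp [pvSplitTT])

lemma splitTT_cons_of_not_prefix (c : Char) (s' : List Char) (h : ¬ (['~', '~'] <+: c :: s')) :
    pvSplitTT (c :: s') = (pvSplitTT s').map (fun p => (c :: p.1, p.2)) := by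
  cases s' with
  | nil => simp [pvSplitTT]
  | cons b t =>
    have hab : ¬ (c = '~' ∧ b = '~') := by
      intro ⟨h1, h2⟩
      exact h (by rw [h1, h2]; exact ⟨t, rfl⟩)
    simp [pvSplitTT, hab]

lemma specTop_cons_of_not_open (c : Char) (s' : List Char) (h : ¬ (['~', '~'] <+: c :: s')) :
    specTop (c :: s') = c :: specTop s' := by
  have hsplit := splitTT_cons_of_not_prefix c s' h
  cases hsp : pvSplitTT s' with
  | none =>
    rw [hsp] at hsplit; simp at hsplit
    rw [specTop_of_none _ hsplit, specTop_of_none _ hsp]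
  | some p =>
    obtain ⟨m', r⟩ := p
    rw [hsp] at hsplit; simp at hsplit
    cases hr : pvSplitTT r with
    | none =>
      rw [specTop_of_some_none _ _ _ hsplit hr, specTop_of_some_none _ _ _ hsp hr]
    | some q =>
      obtain ⟨m2, r2⟩ := q
      rw [specTop_eq _ _ _ _ _ hsplit hr, specTop_eq _ _ _ _ _ hsp hr]
      simp

lemma specTop_id_of_no_close (t : List Char) (h : ¬ (['~', '~'] <:+: t)) :
    specTop ('~' :: t) = '~' :: t := by
  cases t with
  | nil => exact specTop_of_none _ (by simp [pvSplitTT])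
  | cons c t' =>
    by_cases hc : c = '~'
    · subst hc
      have hsp : pvSplitTT ('~' :: '~' :: t') = some ([], t') := by simp [pvSplitTT]
      have ht' : pvSplitTT t' = none := by
        rw [splitTT_none_iff]
        intro hin
        exact h (List.infix_cons hin)
      exact specTop_of_some_none _ _ _ hsp ht'
    · have hnp : ¬ (['~', '~'] <+: '~' :: c :: t') := by
        intro hpre
        rw [List.cons_prefix_cons] at hpre
        obtain ⟨_, hpre2⟩ := hpre
        rw [List.cons_prefix_cons] at hpre2
        exact hc hpre2.1.symm
      rw [specTop_cons_of_not_open _ _ hnp]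
      have hnone : pvSplitTT (c :: t') = none := by
        rw [splitTT_none_iff]; exact h
      rw [specTop_of_none _ hnone]

lemma take_two_TT (s : List Char) (h : s.take 2 = ['~', '~']) : ∃ t, s = '~' :: '~' :: t := by
  cases s with
  | nil => simp at h
  | cons a s1 =>
    cases s1 with
    | nil => simp at h
    | cons b t =>
      simp at h
      exact ⟨t, by rw [h.1, h.2]⟩

-- ===== A-side: the scan loop computes specTop =====

lemma pvGoA_eq (l : List Char) : ∀ (fuel i : Nat) (res : List Char), l.length - i < fuel →
    pvGoA l fuel i res = res ++ specTop (List.drop i l) := by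
  intro fuel
  induction fuel with
  | zero => intro i res h; omega
  | succ fuel ih =>
    intro i res h
    by_cases hi : i < l.length
    · have hdrop : List.drop i l = l[i] :: List.drop (i + 1) l := List.drop_eq_getElem_cons hi
      have hcast : ((i : Int) + 2) = ((i + 2 : Nat) : Int) := by push_cast; ring
      have hsl : PySem.List.slice l (some (i : Int)) (some ((i : Int) + 2)) =
          (List.drop i l).take 2 := by
        rw [hcast, PySem.List.slice_natCast]
        congr 1
        omega
      have hget : PySem.List.pyGet? l (i : Int) = some l[i] := by
        rw [PySem.List.pyGet?_natCast]
        exact List.getElem?_eq_getElem hi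
      by_cases hTT : ∃ t, List.drop i l = '~' :: '~' :: t
      · obtain ⟨t, ht⟩ := hTT
        have hlen : (List.drop i l).length = l.length - i := List.length_drop ..
        have hlen2 : l.length - i = t.length + 2 := by rw [← hlen, ht]; simp
        have hle : i + 2 ≤ l.length := by omega
        have hdt : List.drop (i + 2) l = t := by
          have : List.drop (i + 2) l = List.drop 2 (List.drop i l) := by
            rw [List.drop_drop]
          rw [this, ht]; rfl
        have hsl2 : PySem.List.slice l (some (i : Int)) (some ((i : Int) + 2)) = ['~', '~'] := by
          rw [hsl, ht]; rfl
        have hff := PySem.Chars.findFrom_natCast l ['~', '~'] (i + 2) hle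
        rw [hdt] at hff
        cases hsp : pvSplitTT t with
        | none =>
          have hfindt : PySem.Chars.find t ['~', '~'] = -1 := find_TT_none t hsp
          have hffv : PySem.Chars.findFrom l ['~', '~'] ((i : Int) + 2) = -1 := by
            rw [hcast, hff, if_pos hfindt]
          have hcond : ¬ (PySem.List.slice l (some (i : Int)) (some ((i : Int) + 2)) = ['~', '~'] ∧
              PySem.Chars.findFrom l ['~', '~'] ((i : Int) + 2) ≠ -1) := by
            intro ⟨_, hc2⟩; exact hc2 hffv
          rw [pvGoA, if_pos hi, if_neg hcond, hget]
          change pvGoA l fuel (i + 1) (res ++ [l[i]]) = _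
          rw [ih (i + 1) (res ++ [l[i]]) (by omega)]
          have hcons : l[i] :: List.drop (i + 1) l = '~' :: '~' :: t := hdrop.symm.trans ht
          injection hcons with hli hdi1
          have hnc : ¬ (['~', '~'] <:+: t) := (splitTT_none_iff t).mp hsp
          rw [hdi1, specTop_id_of_no_close t hnc]
          have hspec : specTop (List.drop i l) = List.drop i l := by
            have hsp0 : pvSplitTT (List.drop i l) = some ([], t) := by
              rw [ht]; simp [pvSplitTT]
            exact specTop_of_some_none _ _ _ hsp0 hsp
          rw [hspec, ht, hli]
          simp
        | some p =>
          obtain ⟨m, r⟩ := p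
          have hshape := splitTT_shape t m r hsp
          have hfindt : PySem.Chars.find t ['~', '~'] = (m.length : Int) := find_TT_some t m r hsp
          have hffv : PySem.Chars.findFrom l ['~', '~'] ((i : Int) + 2) =
              ((i + 2 + m.length : Nat) : Int) := by
            rw [hcast, hff, if_neg (by rw [hfindt]; omega), hfindt]
            push_cast; ring
          have hffne : PySem.Chars.findFrom l ['~', '~'] ((i : Int) + 2) ≠ -1 := by
            rw [hffv]; omega
          have hcond : PySem.List.slice l (some (i : Int)) (some ((i : Int) + 2)) = ['~', '~'] ∧
              PySem.Chars.findFrom l ['~', '~'] ((i : Int) + 2) ≠ -1 := ⟨hsl2, hffne⟩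
          rw [pvGoA, if_pos hi, if_pos hcond]
          simp only [hffv, ne_eq]
          rw [if_pos (by omega)]
          have htoNat : ((i + 2 + m.length : Nat) : Int).toNat = i + 2 + m.length := by omega
          have hsl3 : PySem.List.slice l (some ((i : Int) + 2)) (some ((i + 2 + m.length : Nat) : Int)) = m := by
            rw [hcast, PySem.List.slice_natCast]
            have : i + 2 + m.length - (i + 2) = m.length := by omega
            rw [this, hdt, hshape, TT_take]
          rw [hsl3, htoNat]
          have hdr : List.drop (i + 2 + m.length + 2) l = r := by
            have harith : i + 2 + (m.length + 2) = i + 2 + m.length + 2 := by omega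
            have : List.drop (i + 2 + m.length + 2) l = List.drop (m.length + 2) (List.drop (i + 2) l) := by
              rw [List.drop_drop, harith]
            rw [this, hdt, hshape, TT_drop]
          have hlenr := splitTT_len t m r hsp
          rw [ih (i + 2 + m.length + 2) _ (by omega), hdr]
          have hspec : specTop (List.drop i l) =
              [] ++ "<ins>".toList ++ m ++ "</ins>".toList ++ specTop r := by
            have hsp0 : pvSplitTT (List.drop i l) = some ([], t) := by
              rw [ht]; simp [pvSplitTT]
            exact specTop_eq _ _ _ _ _ hsp0 hsp
          rw [hspec]
          simp
      · have hns : PySem.List.slice l (some (i : Int)) (some ((i : Int) + 2)) ≠ ['~', '~'] := by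
          rw [hsl]
          intro heq
          exact hTT (take_two_TT _ heq)
        have hcond : ¬ (PySem.List.slice l (some (i : Int)) (some ((i : Int) + 2)) = ['~', '~'] ∧
            PySem.Chars.findFrom l ['~', '~'] ((i : Int) + 2) ≠ -1) := by
          intro ⟨hc1, _⟩; exact hns hc1
        rw [pvGoA, if_pos hi, if_neg hcond, hget]
        change pvGoA l fuel (i + 1) (res ++ [l[i]]) = _
        rw [ih (i + 1) (res ++ [l[i]]) (by omega)]
        have hnp : ¬ (['~', '~'] <+: l[i] :: List.drop (i + 1) l) := by
          intro hpre
          apply hTT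
          obtain ⟨u, hu⟩ := hpre
          refine ⟨List.drop 2 (List.drop i l), ?_⟩
          rw [hdrop, ← hu]
          simp
        have
          hspec : specTop (List.drop i l) = l[i] :: specTop (List.drop (i + 1) l) := by
          rw [hdrop]
          exact specTop_cons_of_not_open _ _ hnp
        rw [hspec]
        simp
    · have hd : List.drop i l = [] := List.drop_eq_nil_of_le (by omega)
      rw [pvGoA, if_neg hi, hd, specTop_nil]
      simp

-- ===== B-side: the chunk loop computes specTop =====

lemma pvGoB_eq : ∀ (fuel : Nat) (rest : List Char) (chunks : List (List Char)),
    rest.length < fuel →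
    (pvGoB fuel rest chunks).flatten = chunks.flatten ++ specTop rest := by
  intro fuel
  induction fuel with
  | zero => intro rest chunks h; omega
  | succ fuel ih =>
    intro rest chunks h
    cases hsp : pvSplitTT rest with
    | none =>
      have hfind : PySem.Chars.find rest ['~', '~'] = -1 := find_TT_none rest hsp
      rw [pvGoB]
      simp only [hfind]
      simp only [if_true]
      rw [specTop_of_none _ hsp]
      simp
    | some p =>
      obtain ⟨p0, r⟩ := p
      have hshape := splitTT_shape rest p0 r hsp
      have hlen := splitTT_len rest p0 r hsp
      have hfind : PySem.Chars.find rest ['~', '~'] = (p0.length : Int) := find_TT_some rest p0 r hsp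
      have hcast : ((p0.length : Int) + 2) = ((p0.length + 2 : Nat) : Int) := by push_cast; ring
      have hle : p0.length + 2 ≤ rest.length := by omega
      have hdr : List.drop (p0.length + 2) rest = r := by rw [hshape, TT_drop]
      have hff := PySem.Chars.findFrom_natCast rest ['~', '~'] (p0.length + 2) hle
      rw [hdr] at hff
      rw [pvGoB]
      simp only [hfind]
      rw [if_neg (by omega)]
      cases hspr : pvSplitTT r with
      | none =>
        have hfr : PySem.Chars.find r ['~', '~'] = -1 := find_TT_none r hspr
        have hffv : PySem.Chars.findFrom rest ['~', '~'] ((p0.length : Int) + 2) = -1 := by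
          rw [hcast, hff, if_pos hfr]
        rw [hffv, if_pos rfl]
        rw [specTop_of_some_none _ _ _ hsp hspr]
        simp
      | some q =>
        obtain ⟨m, r'⟩ := q
        have hshr := splitTT_shape r m r' hspr
        have hlenr := splitTT_len r m r' hspr
        have hfr : PySem.Chars.find r ['~', '~'] = (m.length : Int) := find_TT_some r m r' hspr
        have hffv : PySem.Chars.findFrom rest ['~', '~'] ((p0.length : Int) + 2) =
            ((p0.length + 2 + m.length : Nat) : Int) := by
          rw [hcast, hff, if_neg (by rw [hfr]; omega), hfr]
          push_cast; ring
        rw [hffv, if_neg (by omega)]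
        have hs1 : PySem.List.slice rest none (some (p0.length : Int)) = p0 := by
          rw [PySem.List.slice_to rest (by omega)]
          have : ((p0.length : Int)).toNat = p0.length := by omega
          rw [this, hshape, TT_take]
        have hs2 : PySem.List.slice rest (some ((p0.length : Int) + 2))
            (some ((p0.length + 2 + m.length : Nat) : Int)) = m := by
          rw [hcast, PySem.List.slice_natCast]
          have : p0.length + 2 + m.length - (p0.length + 2) = m.length := by omega
          rw [this, hdr, hshr, TT_take]
        have hs3 : PySem.List.slice rest (some (((p0.length + 2 + m.length : Nat) : Int) + 2)) none = r' := by
          have hc2 : (((p0.length + 2 + m.length : Nat) : Int) + 2) = ((p0.length + 2 + m.length + 2 : Nat) : Int) := by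
            push_cast; ring
          rw [hc2, PySem.List.slice_from rest (by omega)]
          have : ((p0.length + 2 + m.length + 2 : Nat) : Int).toNat = p0.length + 2 + m.length + 2 := by omega
          rw [this]
          have harith : p0.length + 2 + (m.length + 2) = p0.length + 2 + m.length + 2 := by omega
          have : List.drop (p0.length + 2 + m.length + 2) rest = List.drop (m.length + 2) (List.drop (p0.length + 2) rest) := by
            rw [List.drop_drop, harith]
          rw [this, hdr, hshr, TT_drop]
        rw [hs1, hs2, hs3]
        rw [ih r' _ (by omega)]
        rw [specTop_eq _ _ _ _ _ hsp hspr]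
        simp

lemma join_nil_flatten (xs : List (List Char)) : PySem.Chars.join [] xs = xs.flatten := by
  show List.intercalate [] xs = xs.flatten
  unfold List.intercalate
  induction xs with
  | nil => simp
  | cons a t ih =>
    cases t with
    | nil => simp
    | cons b t' => simp_all [List.intersperse]

-- ===== VERDICT (by name: the statement is the Claim_ definition above) =====
theorem compile_strikethrough_spec : Claim_equal_compile_strikethrough := by
  intro line _
  unfold Spec_compile_strikethrough compile_strikethrough compile_strikethrough_alt
  rw [pvGoA_eq line.toList (line.toList.length + 1) 0 [] (by omega)]
  rw [join_nil_flatten, pvGoB_eq (line.toList.length + 1) line.toList [] (by omega)]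
  simp
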